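-- pv_equiv track=rewrite | github.com/sannisthsoni/DataStructure | Leetcode/MaxDistanceToClosestPerson.py | solution
-- ===== SOURCE A (Python) =====
-- def solution(seats):
--     global_counter = 0
--     local_counter = 0
--
--     for i in seats:
--         if i == 0:
--             local_counter += 1
--         if i == 1:
--             if local_counter > global_counter :
--                 global_counter = local_counter
--             local_counter = 0
--
--     return global_counter
-- ===== SOURCE B (Python) =====
-- def solution(seats):
--     # Different decomposition: instead of a running zero-counter reset at each 1,
--     # remember the position after the previous 1 and, at each 1, count the zeros
--     # in the slice since then.  (The run after the last 1 is intentionally not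
--     # counted, matching A.)
--     best = 0
--     prev = 0
--     for k, x in enumerate(seats):
--         if x == 1:
--             best = max(best, seats[prev:k].count(0))
--             prev = k + 1
--     return best
-- ===== Notes on version B (the rewrite author's own statement) =====
-- stated objective: alternative
-- what changed: Replaced the running zero-counter that is reset at every 1 by a slice-based decomposition: track the position after the previous 1 and, at each 1, count the zeros in the slice since that position, taking the maximum; the trailing segment after the last 1 is (like in A) never counted.
import Mathlib
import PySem

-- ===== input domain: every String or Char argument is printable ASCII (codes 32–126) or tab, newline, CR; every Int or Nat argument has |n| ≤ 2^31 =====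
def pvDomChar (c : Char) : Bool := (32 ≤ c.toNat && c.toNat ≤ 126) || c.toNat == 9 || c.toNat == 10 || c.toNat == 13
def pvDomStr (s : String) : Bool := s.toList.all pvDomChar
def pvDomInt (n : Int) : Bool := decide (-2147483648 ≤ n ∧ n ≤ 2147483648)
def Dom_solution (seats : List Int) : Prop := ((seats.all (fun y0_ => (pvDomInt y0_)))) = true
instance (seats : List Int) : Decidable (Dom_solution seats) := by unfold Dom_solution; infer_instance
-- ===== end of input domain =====

-- B replaces A's running zero-counter (reset at each 1) by a slice-based decomposition:
-- at each 1 it counts the zeros since the position after the previous 1 ("alternative", not faster).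

-- ===== PORT A =====
def solution (seats : List Int) : Int :=
  (seats.foldl
    (fun (s : Int × Int) i =>
      let l := if i == 0 then s.2 + 1 else s.2
      if i == 1 then (if l > s.1 then (l, 0) else (s.1, 0)) else (s.1, l))
    (0, 0)).1

-- ===== PORT B =====
def solution_alt (seats : List Int) : Int :=
  ((PySem.List.enumerate seats 0).foldl
    (fun (s : Int × Int) (p : Int × Int) =>
      if p.2 == 1 then
        (max s.1 (((PySem.List.slice seats (some s.2) (some p.1)).count 0 : Int)), p.1 + 1)
      else s)
    (0, 0)).1

-- ===== PRECONDITION & SPEC =====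
def Spec_solution (seats : List Int) (out : Int) : Prop := out = solution_alt seats
instance (seats : List Int) (out : Int) : Decidable (Spec_solution seats out) := by unfold Spec_solution; infer_instance

-- ===== CLAIM (what is proved, stated in full; the proofs are below) =====
def Claim_equal_solution : Prop := ∀ (seats : List Int), Dom_solution seats → Spec_solution seats (solution seats)

-- ===== LEMMAS AND PROOFS =====

lemma pv_take_succ_count (seats : List Int) (prev t : Nat) (x : Int)
    (hle : prev ≤ t) (hx : seats[t]? = some x) :
    (((seats.drop prev).take (t + 1 - prev)).count 0 : Int)
      = (((seats.drop prev).take (t - prev)).count 0 : Int)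
        + (if x == 0 then 1 else 0) := by
  have h1 : t + 1 - prev = (t - prev) + 1 := by omega
  have h2 : (seats.drop prev)[t - prev]? = some x := by
    rw [List.getElem?_drop]
    have : prev + (t - prev) = t := by omega
    rw [this, hx]
  rw [h1, List.take_add_one, h2]
  simp [List.count_append]
  by_cases h : x = 0 <;> simp [h]

lemma pv_main (seats : List Int) : ∀ (xs : List Int) (t prev : Nat) (g l : Int),
    xs = seats.drop t → prev ≤ t → 0 ≤ g →
    l = (((seats.drop prev).take (t - prev)).count 0 : Int) →
    (xs.foldl
      (fun (s : Int × Int) i =>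
        let l := if i == 0 then s.2 + 1 else s.2
        if i == 1 then (if l > s.1 then (l, 0) else (s.1, 0)) else (s.1, l))
      (g, l)).1
    = ((PySem.List.enumerate xs (t : Int)).foldl
        (fun (s : Int × Int) (p : Int × Int) =>
          if p.2 == 1 then
            (max s.1 (((PySem.List.slice seats (some s.2) (some p.1)).count 0 : Int)), p.1 + 1)
          else s)
        (g, (prev : Int))).1 := by
  intro xs
  induction xs with
  | nil => intro t prev g l _ _ _ _; simp [PySem.List.enumerate_nil]
  | cons x xs ih =>
    intro t prev g l hxs hle hg hl
    have hx : seats[t]? = some x := by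
      have : (seats.drop t)[0]? = some x := by rw [← hxs]; simp
      simpa [List.getElem?_drop] using this
    have hxs' : xs = seats.drop (t + 1) := by
      have := congrArg List.tail hxs
      simpa [List.tail_drop] using this
    have hcastt : ((t : Int) + 1) = (((t + 1 : Nat)) : Int) := by push_cast; ring
    have hslice : PySem.List.slice seats (some ((prev : Nat) : Int)) (some ((t : Nat) : Int))
        = (seats.drop prev).take (t - prev) := PySem.List.slice_natCast seats prev t
    rw [PySem.List.enumerate_cons]
    simp only [List.foldl_cons]
    by_cases h1 : x = 1
    · subst h1
      simp only [show ((1 : Int) == 1) = true from rfl, show ((1 : Int) == 0) = false from rfl,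
        Bool.false_eq_true, if_false, if_true, hslice, ← hl]
      have hmax : (if l > g then (l, (0 : Int)) else (g, (0 : Int))) = (max g l, 0) := by
        split <;> (rename_i hc; simp [max_def]; omega)
      rw [hmax, hcastt]
      exact ih (t + 1) (t + 1) (max g l) 0 hxs' (le_refl _)
        (le_trans hg (le_max_left _ _)) (by simp)
    · simp only [show (x == 1) = false by simp [h1], Bool.false_eq_true, if_false]
      rw [hcastt]
      have hcount := pv_take_succ_count seats prev t x hle hx
      exact ih (t + 1) prev g _ hxs' (by omega) hg
        (by rw [hcount]; by_cases h0 : x = 0 <;> simp [h0, hl])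

-- ===== VERDICT (by name: the statement is the Claim_ definition above) =====
theorem solution_spec : Claim_equal_solution := by
  intro seats _
  unfold Spec_solution solution solution_alt
  have := pv_main seats seats 0 0 0 0 (by simp) (le_refl 0) (le_refl 0) (by simp)
  simpa using this
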